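-- pv_equiv track=rewrite | github.com/stilllearn/DataVisualization | users/tests.py | func
-- ===== SOURCE A (Python) =====
-- def func(arr):
--     left = []
--     right = []
--     left.append(0)
--     left.append(1)
--     right.append(0)
--     right.append(1)
--     for j in range(2,len(arr)):
--         k=j-1
--         l = j-2
--         le = 0
--         while l>=0:
--             if arr[k]<=arr[l]:
--                 break
--             l-=1
--         if l < 0:
--             le = 1
--         else:
--             le = left[l+1]+1
--         left.append(le)
--     ls = len(arr)
--     j=ls-3
--     while j >=0:
--         k=j+1
--         l = j+2
--         re = 0
--         while l<ls:
--             if arr[k]<=arr[l]: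
--                 break
--             l +=1
--         if l ==ls:
--             re = 1
--         else:
--             re=right[ls-l]+1
--         right.append(re)
--         j-=1
--     return left,right
-- ===== SOURCE B (Python) =====
-- def func(arr):
--     n = len(arr)
--     L = []          # L[i] = chain length via nearest previous >= element of index i
--     stack = []      # indices with non-increasing arr values, top = last
--     for i in range(n):
--         while stack and arr[stack[-1]] < arr[i]:
--             stack.pop()
--         L.append(L[stack[-1]] + 1 if stack else 1)
--         stack.append(i)
--     R = []          # R[m] = chain length via nearest next >= element of index n-1-m
--     stack = []
--     for i in range(n - 1, -1, -1):
--         while stack and arr[stack[-1]] < arr[i]: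
--             stack.pop()
--         R.append(R[n - 1 - stack[-1]] + 1 if stack else 1)
--         stack.append(i)
--     return [0, 1] + L[1:n - 1], [0, 1] + R[1:n - 1]
-- ===== Notes on version B (the rewrite author's own statement) =====
-- stated objective: faster
-- what changed: Replaced A's per-element backward/forward linear rescans with two monotonic-stack passes that find each element's nearest previous/next greater-or-equal index in amortized O(1) and carry the chain length forward.
import Mathlib
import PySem

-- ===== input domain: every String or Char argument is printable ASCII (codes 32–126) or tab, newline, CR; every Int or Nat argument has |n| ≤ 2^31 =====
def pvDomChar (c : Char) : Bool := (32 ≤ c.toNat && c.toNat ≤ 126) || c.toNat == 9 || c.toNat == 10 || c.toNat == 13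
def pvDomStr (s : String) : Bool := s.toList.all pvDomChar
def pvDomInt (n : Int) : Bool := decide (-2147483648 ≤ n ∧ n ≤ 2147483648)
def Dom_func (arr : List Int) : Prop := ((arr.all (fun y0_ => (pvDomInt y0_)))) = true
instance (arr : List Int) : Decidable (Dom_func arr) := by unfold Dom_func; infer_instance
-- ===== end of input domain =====

-- B replaces A's quadratic per-element rescans by two monotonic-stack passes (objective: faster).

-- ===== PORT A =====
-- inner while of the left pass: `while l >= 0: if arr[k] <= arr[l]: break; l -= 1`.
-- The running index l is represented by the counter c = l+1 (c = 0 is Python's l = -1),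
-- so the loop is the structural recursion on c; x is the value arr[k]. Exact step for step.
def scanDownA (arr : List Int) (x : Int) : Nat → Int
  | 0 => -1
  | c + 1 => if x ≤ arr.getD c 0 then (c : Int) else scanDownA arr x c

-- body of A's `for j in range(2, len(arr))` loop (l starts at j-2, i.e. counter j-1)
def stepA (arr : List Int) (left : List Int) (j : Nat) : List Int :=
  let l := scanDownA arr (arr.getD (j - 1) 0) (j - 1)
  let le : Int := if l < 0 then 1 else left.getD (l + 1).toNat 0 + 1
  left ++ [le]

-- inner while of the right pass: `while l < ls: if arr[k] <= arr[l]: break; l += 1`,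
-- recursion on rem = ls - l, the number of indices left to scan; returns the final l. Exact.
def scanUpA (arr : List Int) (x : Int) (l : Nat) : Nat → Nat
  | 0 => l
  | rem + 1 => if x ≤ arr.getD l 0 then l else scanUpA arr x (l + 1) rem

-- A's `while j >= 0: ... j -= 1` loop, recursion on the counter t = j+1
-- (t = 0 is Python's j = -1; the initial j = ls-3 becomes the counter ls-2, clamped at 0
-- exactly when Python's loop body never runs)
def rightLoopA (arr : List Int) (n : Nat) (right : List Int) : Nat → List Int
  | 0 => right
  | t + 1 =>
    let l := scanUpA arr (arr.getD (t + 1) 0) (t + 2) (n - (t + 2))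
    let re : Int := if l = n then 1 else right.getD (n - l) 0 + 1
    rightLoopA arr n (right ++ [re]) t

def func (arr : List Int) : List Int × List Int :=
  let left := (List.range' 2 (arr.length - 2)).foldl (stepA arr) [0, 1]
  let right := rightLoopA arr arr.length [0, 1] (arr.length - 2)
  (left, right)

-- ===== PORT B =====
-- Source B's inner while: pop the stack while the top's value is < x
def popStk (arr : List Int) (x : Int) : List Nat → List Nat
  | [] => []
  | s :: rest => if arr.getD s 0 < x then popStk arr x rest else s :: rest

-- body of Source B's first loop (state: the list L and the stack, head = top)
def stepL (arr : List Int) (st : List Int × List Nat) (i : Nat) : List Int × List Nat :=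
  let stk := popStk arr (arr.getD i 0) st.2
  let v : Int := match stk with
    | [] => 1
    | s :: _ => st.1.getD s 0 + 1
  (st.1 ++ [v], i :: stk)

-- body of Source B's second loop (R is indexed by n-1-index)
def stepR (arr : List Int) (n : Nat) (st : List Int × List Nat) (i : Nat) : List Int × List Nat :=
  let stk := popStk arr (arr.getD i 0) st.2
  let v : Int := match stk with
    | [] => 1
    | s :: _ => st.1.getD (n - 1 - s) 0 + 1
  (st.1 ++ [v], i :: stk)

def func_alt (arr : List Int) : List Int × List Int :=
  let n := arr.length
  let L := ((List.range n).foldl (stepL arr) ([], [])).1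
  let R := ((List.range n).reverse.foldl (stepR arr n) ([], [])).1
  ((0 : Int) :: 1 :: PySem.List.slice L (some 1) (some ((n : Int) - 1)),
   (0 : Int) :: 1 :: PySem.List.slice R (some 1) (some ((n : Int) - 1)))

-- ===== PRECONDITION & SPEC =====
def Spec_func (arr : List Int) (out : List Int × List Int) : Prop := out = func_alt arr
instance (arr : List Int) (out : List Int × List Int) : Decidable (Spec_func arr out) := by unfold Spec_func; infer_instance

-- ===== CLAIM (what is proved, stated in full; the proofs are below) =====
def Claim_equal_func : Prop := ∀ (arr : List Int), Dom_func arr → Spec_func arr (func arr)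

-- ===== LEMMAS AND PROOFS =====

-- greatest l < j with x ≤ arr[l]
def pge (arr : List Int) (x : Int) : Nat → Option Nat
  | 0 => none
  | j + 1 => if x ≤ arr.getD j 0 then some j else pge arr x j

theorem pge_lt {arr : List Int} {x : Int} : ∀ {j l : Nat}, pge arr x j = some l → l < j := by
  intro j
  induction j with
  | zero => intro l h; simp [pge] at h
  | succ j ih =>
    intro l h
    simp only [pge] at h
    split at h
    · cases h; omega
    · have := ih h; omega

-- chain length through nearest previous ≥ elements
def Lv (arr : List Int) (i : Nat) : Nat :=
  match h : pge arr (arr.getD i 0) i with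
  | none => 1
  | some l => Lv arr l + 1
termination_by i
decreasing_by exact pge_lt h

-- least l with j ≤ l < n and x ≤ arr[l]
def nge (arr : List Int) (x : Int) (n j : Nat) : Option Nat :=
  if j < n then
    if x ≤ arr.getD j 0 then some j else nge arr x n (j + 1)
  else none
termination_by n - j
decreasing_by omega

theorem nge_bounds {arr : List Int} {x : Int} {n j l : Nat} (h : nge arr x n j = some l) :
    j ≤ l ∧ l < n := by
  fun_induction nge arr x n j with
  | case1 j hj hx => cases h; omega
  | case2 j hj hx ih => have := ih h; omega
  | case3 j hj => simp at h

-- chain length through nearest next ≥ elements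
def Rv (arr : List Int) (n : Nat) (i : Nat) : Nat :=
  match h : nge arr (arr.getD i 0) n (i + 1) with
  | none => 1
  | some l => Rv arr n l + 1
termination_by n - i
decreasing_by have := nge_bounds h; omega


-- pge returns the greatest l < j with x ≤ arr[l] (the index A's downward scan stops at)
theorem pge_eq_none {arr : List Int} {x : Int} : ∀ {j : Nat},
    (∀ m, m < j → arr.getD m 0 < x) → pge arr x j = none := by
  intro j
  induction j with
  | zero => intro _; rfl
  | succ j ih =>
    intro h
    simp only [pge]
    rw [if_neg (by have := h j (by omega); omega), ih (fun m hm => h m (by omega))]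

theorem pge_eq_some {arr : List Int} {x : Int} {l : Nat} (hx : x ≤ arr.getD l 0) :
    ∀ {j : Nat}, l < j → (∀ m, l < m → m < j → arr.getD m 0 < x) → pge arr x j = some l := by
  intro j
  induction j with
  | zero => intro h _; exact absurd h (Nat.not_lt_zero l)
  | succ j ih =>
    intro hlj hm
    simp only [pge]
    by_cases hj : l = j
    · subst hj; rw [if_pos hx]
    · rw [if_neg (by have := hm j (by omega) (by omega); omega),
        ih (by omega) (fun m h1 h2 => hm m h1 (by omega))]

theorem nge_eq_none {arr : List Int} {x : Int} {n : Nat} :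
    ∀ (j : Nat), (∀ m, j ≤ m → m < n → arr.getD m 0 < x) → nge arr x n j = none := by
  intro j h
  rw [nge]
  split
  · rw [if_neg (by have := h j le_rfl ‹j < n›; omega)]
    exact nge_eq_none (j + 1) (fun m hm => h m (by omega))
  · rfl
termination_by j => n - j
decreasing_by omega

theorem nge_eq_some {arr : List Int} {x : Int} {n s : Nat} (hx : x ≤ arr.getD s 0) (hs : s < n) :
    ∀ (j : Nat), j ≤ s → (∀ m, j ≤ m → m < s → arr.getD m 0 < x) → nge arr x n j = some s := by
  intro j hj h
  rw [nge, if_pos (by omega)]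
  by_cases hjs : j = s
  · subst hjs; rw [if_pos hx]
  · rw [if_neg (by have := h j le_rfl (by omega); omega)]
    exact nge_eq_some hx hs (j + 1) (by omega) (fun m hm => h m (by omega))
termination_by j => s - j
decreasing_by omega

theorem Lv_of_none {arr : List Int} {i : Nat} (h : pge arr (arr.getD i 0) i = none) :
    Lv arr i = 1 := by
  rw [Lv]; split <;> simp_all

theorem Lv_of_some {arr : List Int} {i l : Nat} (h : pge arr (arr.getD i 0) i = some l) :
    Lv arr i = Lv arr l + 1 := by
  rw [Lv]; split <;> simp_all

theorem Rv_of_none {arr : List Int} {n i : Nat} (h : nge arr (arr.getD i 0) n (i + 1) = none) :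
    Rv arr n i = 1 := by
  rw [Rv]; split <;> simp_all

theorem Rv_of_some {arr : List Int} {n i l : Nat} (h : nge arr (arr.getD i 0) n (i + 1) = some l) :
    Rv arr n i = Rv arr n l + 1 := by
  rw [Rv]; split <;> simp_all

-- ===== A-side: the scans compute pge / nge =====
theorem scanDownA_eq (arr : List Int) (x : Int) : ∀ (m : Nat),
    scanDownA arr x m = (pge arr x m).elim (-1) (fun l => (l : Int)) := by
  intro m
  induction m with
  | zero => rfl
  | succ m ih =>
    simp only [scanDownA, pge]
    by_cases hx : x ≤ arr.getD m 0
    · rw [if_pos hx, if_pos hx]; rfl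
    · rw [if_neg hx, if_neg hx, ih]

theorem scanUpA_eq (arr : List Int) (x : Int) (n : Nat) : ∀ (rem l : Nat), l + rem = n →
    scanUpA arr x l rem = (nge arr x n l).elim n (fun k => k) := by
  intro rem
  induction rem with
  | zero =>
    intro l h
    simp only [scanUpA]
    rw [show l = n from by omega, nge]
    simp
  | succ rem ih =>
    intro l h
    have hln : l < n := by omega
    simp only [scanUpA]
    rw [nge, if_pos hln]
    by_cases hx : x ≤ arr.getD l 0
    · rw [if_pos hx, if_pos hx]; rfl
    · rw [if_neg hx, if_neg hx]; exact ih (l + 1) (by omega)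

-- ===== A-side: the accumulated left list, looked up at l+1, holds Lv l =====
theorem leftA_getD (arr : List Int) : ∀ (s l : Nat), l ≤ s →
    ((0 : Int) :: 1 :: (List.range' 1 s).map (fun i => (Lv arr i : Int))).getD (l + 1) 0
      = (Lv arr l : Int) := by
  intro s l hls
  cases l with
  | zero =>
    have h0 : Lv arr 0 = 1 := Lv_of_none rfl
    simp [h0]
  | succ l =>
    have hlen : l < ((List.range' 1 s).map (fun i => (Lv arr i : Int))).length := by
      simp; omega
    simp only [List.getD_cons_succ]
    rw [List.getD_eq_getElem _ _ hlen]
    simp only [List.getElem_map, List.getElem_range']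
    congr 2
    omega

theorem leftA_loop (arr : List Int) : ∀ (t s : Nat),
    (List.range' (s + 2) t).foldl (stepA arr)
        ((0 : Int) :: 1 :: (List.range' 1 s).map (fun i => (Lv arr i : Int)))
      = (0 : Int) :: 1 :: (List.range' 1 (s + t)).map (fun i => (Lv arr i : Int)) := by
  intro t
  induction t with
  | zero => intro s; simp
  | succ t ih =>
    intro s
    rw [List.range'_succ, List.foldl_cons]
    have hstep : stepA arr ((0 : Int) :: 1 :: (List.range' 1 s).map (fun i => (Lv arr i : Int))) (s + 2)
        = (0 : Int) :: 1 :: (List.range' 1 (s + 1)).map (fun i => (Lv arr i : Int)) := by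
      simp only [stepA]
      have hidx : s + 2 - 1 = s + 1 := by omega
      rw [hidx, scanDownA_eq]
      have hconc : List.range' 1 (s + 1) = List.range' 1 s ++ [1 + s] := by
        have := List.range'_concat (step := 1) (s := 1) (n := s)
        simpa using this
      cases h : pge arr (arr.getD (s + 1) 0) (s + 1) with
      | none =>
        simp only [Option.elim]
        rw [if_pos (by omega)]
        rw [hconc]
        have hlv : ((Lv arr (1 + s) : Nat) : Int) = 1 := by
          rw [show 1 + s = s + 1 from by omega, Lv_of_none h]; norm_num
        simp [hlv]
      | some l0 =>
        have hl0 : l0 < s + 1 := pge_lt h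
        simp only [Option.elim]
        rw [if_neg (by omega)]
        have htn : ((l0 : Int) + 1).toNat = l0 + 1 := by omega
        rw [htn, leftA_getD arr s l0 (by omega)]
        rw [hconc]
        have hlv : ((Lv arr (1 + s) : Nat) : Int) = (Lv arr l0 : Int) + 1 := by
          rw [show 1 + s = s + 1 from by omega, Lv_of_some h]; push_cast; ring
        simp [hlv]
    rw [hstep]
    have h2 : s + 2 + 1 = (s + 1) + 2 := by omega
    have h3 : s + 1 + t = s + (t + 1) := by omega
    rw [h2, ih (s + 1), h3]

-- ===== A-side: the accumulated right list, looked up at n - l, holds Rv l =====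
theorem rightA_getD (arr : List Int) (n : Nat) : ∀ (t l : Nat), t + 2 ≤ l → l ≤ n - 1 → 3 ≤ n →
    ((0 : Int) :: 1 :: ((List.range' (t + 2) (n - 3 - t)).map (fun i => (Rv arr n i : Int))).reverse).getD (n - l) 0
      = (Rv arr n l : Int) := by
  intro t l h1 h2 h3
  by_cases hl : l = n - 1
  · subst hl
    have hidx : n - (n - 1) = 1 := by omega
    have hrv : Rv arr n (n - 1) = 1 := by
      apply Rv_of_none
      have : n - 1 + 1 = n := by omega
      rw [this, nge]; simp
    simp [hidx, hrv]
  · have hk : n - l = (n - l - 2) + 2 := by omega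
    rw [hk]
    simp only [List.getD_cons_succ]
    have hlen : n - l - 2 < (((List.range' (t + 2) (n - 3 - t)).map (fun i => (Rv arr n i : Int))).reverse).length := by
      simp; omega
    rw [List.getD_eq_getElem _ _ hlen]
    rw [List.getElem_reverse]
    simp only [List.getElem_map, List.getElem_range', List.length_map, List.length_range']
    congr 2
    omega

theorem rightA_loop (arr : List Int) (n : Nat) : ∀ (t : Nat), t ≤ n - 2 →
    rightLoopA arr n
        ((0 : Int) :: 1 :: ((List.range' (t + 1) (n - 2 - t)).map (fun i => (Rv arr n i : Int))).reverse)
        t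
      = (0 : Int) :: 1 :: ((List.range' 1 (n - 2)).map (fun i => (Rv arr n i : Int))).reverse := by
  intro t
  induction t with
  | zero => intro _; rfl
  | succ t ih =>
    intro ht
    have h3 : 3 ≤ n := by omega
    simp only [rightLoopA]
    rw [scanUpA_eq arr _ n (n - (t + 2)) (t + 2) (by omega)]
    have hshape : List.range' (t + 1 + 1) (n - 2 - (t + 1)) = List.range' (t + 2) (n - 3 - t) := by
      congr 1 <;> omega
    rw [hshape]
    have hstep : ∀ re : Int, re = (Rv arr n (t + 1) : Int) →
        (0 : Int) :: 1 :: ((List.range' (t + 2) (n - 3 - t)).map (fun i => (Rv arr n i : Int))).reverse ++ [re]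
          = (0 : Int) :: 1 :: ((List.range' (t + 1) (n - 2 - t)).map (fun i => (Rv arr n i : Int))).reverse := by
      intro re hre
      have hc : n - 2 - t = (n - 3 - t) + 1 := by omega
      rw [hc, List.range'_succ, List.map_cons, List.reverse_cons, hre]
      simp
    cases h : nge arr (arr.getD (t + 1) 0) n (t + 2) with
    | none =>
      simp only [Option.elim, eq_self_iff_true, if_true]
      have hrv : Rv arr n (t + 1) = 1 := Rv_of_none (by rw [show t + 1 + 1 = t + 2 from rfl]; exact h)
      rw [hstep 1 (by rw [hrv]; norm_num)]
      exact ih (by omega)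
    | some l0 =>
      obtain ⟨hb1, hb2⟩ := nge_bounds h
      simp only [Option.elim]
      rw [if_neg (by omega)]
      rw [rightA_getD arr n t l0 hb1 (by omega) h3]
      have hrv : Rv arr n (t + 1) = Rv arr n l0 + 1 := Rv_of_some h
      rw [hstep _ (by rw [hrv]; push_cast; ring)]
      exact ih (by omega)

-- ===== B-side: the monotonic stack =====
theorem popStk_append {arr : List Int} {x : Int} : ∀ (stk : List Nat),
    ∃ pre, stk = pre ++ popStk arr x stk ∧ ∀ s ∈ pre, arr.getD s 0 < x := by
  intro stk
  induction stk with
  | nil => exact ⟨[], rfl, by simp⟩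
  | cons s rest ih =>
    simp only [popStk]
    split
    · obtain ⟨pre, h1, h2⟩ := ih
      refine ⟨s :: pre, by rw [List.cons_append]; exact congrArg _ h1, ?_⟩
      intro e he
      rcases List.mem_cons.mp he with h | h
      · subst h; assumption
      · exact h2 e h
    · exact ⟨[], rfl, by simp⟩

theorem popStk_head {arr : List Int} {x : Int} : ∀ {stk : List Nat} {s0 : Nat} {rest : List Nat},
    popStk arr x stk = s0 :: rest → x ≤ arr.getD s0 0 := by
  intro stk
  induction stk with
  | nil => intro s0 rest h; simp [popStk] at h
  | cons s r ih =>
    intro s0 rest h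
    simp only [popStk] at h
    split at h
    · exact ih h
    · cases h; omega

-- invariant of the first pass: the stack holds indices < i in decreasing order, every
-- index below i that is off the stack is dominated by a later on-stack index of ≥ value
def StkInv (arr : List Int) (i : Nat) (stk : List Nat) : Prop :=
  stk.Pairwise (· > ·) ∧ (∀ s ∈ stk, s < i) ∧
  ∀ m, m < i → m ∉ stk → ∃ s ∈ stk, m < s ∧ arr.getD m 0 ≤ arr.getD s 0

theorem pop_head_pge {arr : List Int} {i : Nat} {stk : List Nat} (hinv : StkInv arr i stk)
    (x : Int) : (popStk arr x stk).head? = pge arr x i := by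
  obtain ⟨hpw, hbd, hdom⟩ := hinv
  obtain ⟨pre, heq, hpre⟩ := popStk_append (arr := arr) (x := x) stk
  cases hstk : popStk arr x stk with
  | nil =>
    rw [hstk, List.append_nil] at heq
    symm
    simp only [List.head?_nil]
    apply pge_eq_none
    intro m hm
    by_cases hmem : m ∈ stk
    · exact hpre m (heq ▸ hmem)
    · obtain ⟨s, hs, _, hval⟩ := hdom m hm hmem
      have := hpre s (heq ▸ hs)
      omega
  | cons s0 rest =>
    rw [hstk] at heq
    have hx : x ≤ arr.getD s0 0 := popStk_head hstk
    have hs0 : s0 ∈ stk := by rw [heq]; simp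
    have hrest : ∀ e ∈ rest, e < s0 := by
      rw [heq] at hpw
      have := (List.pairwise_append.mp hpw).2.1
      exact fun e he => List.rel_of_pairwise_cons this he
    have hkey : ∀ m, s0 < m → m < i → arr.getD m 0 < x := by
      intro m hs0m hmi
      by_cases hmem : m ∈ stk
      · rw [heq] at hmem
        rcases List.mem_append.mp hmem with h | h
        · exact hpre m h
        · rcases List.mem_cons.mp h with h | h
          · omega
          · have := hrest m h; omega
      · obtain ⟨s, hs, hms, hval⟩ := hdom m hmi hmem
        rw [heq] at hs
        rcases List.mem_append.mp hs with h | h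
        · have := hpre s h; omega
        · rcases List.mem_cons.mp h with h | h
          · subst h; omega
          · have := hrest s h; omega
    symm
    simp only [List.head?_cons]
    exact pge_eq_some hx (hbd s0 hs0) hkey

theorem stkinv_step {arr : List Int} {i : Nat} {stk : List Nat} (hinv : StkInv arr i stk) :
    StkInv arr (i + 1) (i :: popStk arr (arr.getD i 0) stk) := by
  obtain ⟨hpw, hbd, hdom⟩ := hinv
  obtain ⟨pre, heq, hpre⟩ := popStk_append (arr := arr) (x := arr.getD i 0) stk
  have hsub : ∀ s ∈ popStk arr (arr.getD i 0) stk, s ∈ stk := by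
    intro s hs; rw [heq]; exact List.mem_append_right _ hs
  refine ⟨?_, ?_, ?_⟩
  · refine List.pairwise_cons.mpr ⟨fun s hs => hbd s (hsub s hs), ?_⟩
    rw [heq] at hpw
    exact (List.pairwise_append.mp hpw).2.1
  · intro s hs
    rcases List.mem_cons.mp hs with h | h
    · omega
    · have := hbd s (hsub s h); omega
  · intro m hm hmem
    have hmi : m ≠ i := fun h => hmem (h ▸ List.mem_cons_self)
    have hmlt : m < i := by omega
    have hmst : m ∉ popStk arr (arr.getD i 0) stk := fun h => hmem (List.mem_cons_of_mem _ h)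
    by_cases hin : m ∈ stk
    · rw [heq] at hin
      rcases List.mem_append.mp hin with h | h
      · exact ⟨i, List.mem_cons_self, hmlt, le_of_lt (hpre m h)⟩
      · exact absurd h hmst
    · obtain ⟨s, hs, hms, hval⟩ := hdom m hmlt hin
      rw [heq] at hs
      rcases List.mem_append.mp hs with h | h
      · exact ⟨i, List.mem_cons_self, hmlt, le_of_lt (lt_of_le_of_lt hval (hpre s h))⟩
      · exact ⟨s, List.mem_cons_of_mem _ h, hms, hval⟩

theorem stepsL (arr : List Int) : ∀ (i : Nat), ∃ stk,
    (List.range i).foldl (stepL arr) ([], []) = ((List.range i).map (fun m => (Lv arr m : Int)), stk)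
    ∧ StkInv arr i stk := by
  intro i
  induction i with
  | zero => exact ⟨[], rfl, List.Pairwise.nil, by simp, by simp⟩
  | succ i ih =>
    obtain ⟨stk, heq, hinv⟩ := ih
    refine ⟨i :: popStk arr (arr.getD i 0) stk, ?_, stkinv_step hinv⟩
    rw [List.range_succ, List.foldl_append, heq, List.foldl_cons, List.foldl_nil]
    simp only [stepL, List.map_append]
    have hhead := pop_head_pge hinv (arr.getD i 0)
    cases hstk : popStk arr (arr.getD i 0) stk with
    | nil =>
      rw [hstk] at hhead
      simp only [List.head?_nil] at hhead
      simp [Lv_of_none hhead.symm]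
    | cons s rest =>
      rw [hstk] at hhead
      simp only [List.head?_cons] at hhead
      have hsl : s < i := pge_lt hhead.symm
      refine Prod.ext ?_ rfl
      show (List.range i).map (fun m => (Lv arr m : Int)) ++
          [((List.range i).map (fun m => (Lv arr m : Int))).getD s 0 + 1] = _
      rw [PySem.List.getD_map_range _ _ _ _ hsl]
      have hlv : ((Lv arr i : Nat) : Int) = (Lv arr s : Int) + 1 := by
        rw [Lv_of_some hhead.symm]; push_cast; ring
      simp [hlv]

-- invariant of the second pass (indices in [i, n), increasing order, mirror-image)
def StkInvR (arr : List Int) (n i : Nat) (stk : List Nat) : Prop :=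
  stk.Pairwise (· < ·) ∧ (∀ s ∈ stk, i ≤ s ∧ s < n) ∧
  ∀ m, i ≤ m → m < n → m ∉ stk → ∃ s ∈ stk, s < m ∧ arr.getD m 0 ≤ arr.getD s 0

theorem pop_head_nge {arr : List Int} {n i : Nat} {stk : List Nat} (hinv : StkInvR arr n i stk)
    (x : Int) : (popStk arr x stk).head? = nge arr x n i := by
  obtain ⟨hpw, hbd, hdom⟩ := hinv
  obtain ⟨pre, heq, hpre⟩ := popStk_append (arr := arr) (x := x) stk
  cases hstk : popStk arr x stk with
  | nil =>
    rw [hstk, List.append_nil] at heq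
    symm
    simp only [List.head?_nil]
    apply nge_eq_none
    intro m hm1 hm2
    by_cases hmem : m ∈ stk
    · exact hpre m (heq ▸ hmem)
    · obtain ⟨s, hs, _, hval⟩ := hdom m hm1 hm2 hmem
      have := hpre s (heq ▸ hs)
      omega
  | cons s0 rest =>
    rw [hstk] at heq
    have hx : x ≤ arr.getD s0 0 := popStk_head hstk
    have hs0 : s0 ∈ stk := by rw [heq]; simp
    have hrest : ∀ e ∈ rest, s0 < e := by
      rw [heq] at hpw
      have := (List.pairwise_append.mp hpw).2.1
      exact fun e he => List.rel_of_pairwise_cons this he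
    have hkey : ∀ m, i ≤ m → m < s0 → arr.getD m 0 < x := by
      intro m him hms0
      by_cases hmem : m ∈ stk
      · rw [heq] at hmem
        rcases List.mem_append.mp hmem with h | h
        · exact hpre m h
        · rcases List.mem_cons.mp h with h | h
          · omega
          · have := hrest m h; omega
      · obtain ⟨s, hs, hsm, hval⟩ := hdom m him (by have := (hbd s0 hs0).2; omega) hmem
        rw [heq] at hs
        rcases List.mem_append.mp hs with h | h
        · have := hpre s h; omega
        · rcases List.mem_cons.mp h with h | h
          · subst h; omega
          · have := hrest s h; omega
    symm
    simp only [List.head?_cons]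
    exact nge_eq_some hx (hbd s0 hs0).2 i (hbd s0 hs0).1 hkey

theorem stkinvR_step {arr : List Int} {n i : Nat} {stk : List Nat}
    (hinv : StkInvR arr n (i + 1) stk) (hin : i < n) :
    StkInvR arr n i (i :: popStk arr (arr.getD i 0) stk) := by
  obtain ⟨hpw, hbd, hdom⟩ := hinv
  obtain ⟨pre, heq, hpre⟩ := popStk_append (arr := arr) (x := arr.getD i 0) stk
  have hsub : ∀ s ∈ popStk arr (arr.getD i 0) stk, s ∈ stk := by
    intro s hs; rw [heq]; exact List.mem_append_right _ hs
  refine ⟨?_, ?_, ?_⟩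
  · refine List.pairwise_cons.mpr ⟨fun s hs => by have := (hbd s (hsub s hs)).1; omega, ?_⟩
    rw [heq] at hpw
    exact (List.pairwise_append.mp hpw).2.1
  · intro s hs
    rcases List.mem_cons.mp hs with h | h
    · omega
    · have := hbd s (hsub s h); omega
  · intro m hm1 hm2 hmem
    have hmi : m ≠ i := fun h => hmem (h ▸ List.mem_cons_self)
    have hmgt : i + 1 ≤ m := by omega
    have hmst : m ∉ popStk arr (arr.getD i 0) stk := fun h => hmem (List.mem_cons_of_mem _ h)
    by_cases hin2 : m ∈ stk
    · rw [heq] at hin2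
      rcases List.mem_append.mp hin2 with h | h
      · exact ⟨i, List.mem_cons_self, by omega, le_of_lt (hpre m h)⟩
      · exact absurd h hmst
    · obtain ⟨s, hs, hsm, hval⟩ := hdom m hmgt hm2 hin2
      rw [heq] at hs
      rcases List.mem_append.mp hs with h | h
      · exact ⟨i, List.mem_cons_self, by omega, le_of_lt (lt_of_le_of_lt hval (hpre s h))⟩
      · exact ⟨s, List.mem_cons_of_mem _ h, hsm, hval⟩

theorem stepsR (arr : List Int) (n : Nat) : ∀ (i : Nat), i ≤ n → ∀ (L : List Int) (stk : List Nat),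
    L = (List.range (n - i)).map (fun m => (Rv arr n (n - 1 - m) : Int)) → StkInvR arr n i stk →
    ((List.range i).reverse.foldl (stepR arr n) (L, stk)).1
      = (List.range n).map (fun m => (Rv arr n (n - 1 - m) : Int)) := by
  intro i
  induction i with
  | zero => intro _ L stk hL _; simp [hL]
  | succ i ih =>
    intro hin L stk hL hinv
    rw [List.range_succ, List.reverse_append, List.reverse_singleton, List.singleton_append,
      List.foldl_cons]
    have hhead := pop_head_nge hinv (arr.getD i 0)
    have hLstep : ∀ v : Int, v = (Rv arr n i : Int) →
        L ++ [v] = (List.range (n - i)).map (fun m => (Rv arr n (n - 1 - m) : Int)) := by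
      intro v hv
      have hni : n - i = (n - i - 1) + 1 := by omega
      rw [hni, List.range_succ, List.map_append, hL]
      have h1 : n - i - 1 = n - (i + 1) := by omega
      rw [h1]
      have h2 : n - 1 - (n - (i + 1)) = i := by omega
      simp [h2, hv]
    simp only [stepR]
    cases hstk : popStk arr (arr.getD i 0) stk with
    | nil =>
      rw [hstk] at hhead
      simp only [List.head?_nil] at hhead
      have hrv : Rv arr n i = 1 := Rv_of_none hhead.symm
      exact ih (by omega) _ _ (hLstep 1 (by rw [hrv]; norm_num)) (hstk ▸ stkinvR_step hinv (by omega))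
    | cons s rest =>
      rw [hstk] at hhead
      simp only [List.head?_cons] at hhead
      obtain ⟨hb1, hb2⟩ := nge_bounds hhead.symm
      have hlook : L.getD (n - 1 - s) 0 = (Rv arr n s : Int) := by
        rw [hL, PySem.List.getD_map_range _ _ _ _ (by omega)]
        have harg : n - 1 - (n - 1 - s) = s := by omega
        rw [harg]
      have hrv : Rv arr n i = Rv arr n s + 1 := Rv_of_some hhead.symm
      refine ih (by omega) _ _ (hLstep _ ?_) (hstk ▸ stkinvR_step hinv (by omega))
      show L.getD (n - 1 - s) 0 + 1 = (Rv arr n i : Int)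
      rw [hlook, hrv]
      push_cast; ring

-- ===== glue: slices and reversal =====
theorem take_range' : ∀ (n s k : Nat), (List.range' s n).take k = List.range' s (min k n) := by
  intro n
  induction n with
  | zero => intro s k; simp
  | succ n ih =>
    intro s k
    cases k with
    | zero => simp
    | succ k => simp [List.range'_succ, ih, Nat.succ_min_succ]

theorem slice_map_range (f : Nat → Int) (n : Nat) :
    PySem.List.slice ((List.range n).map f) (some 1) (some ((n : Int) - 1))
      = (List.range' 1 (n - 2)).map f := by
  cases n with
  | zero => simp [PySem.List.slice, PySem.List.clampIdx]
  | succ m =>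
    have hlen : ((List.range (m + 1)).map f).length = m + 1 := by simp
    have hb : ((m + 1 : Nat) : Int) - 1 = ((m : Nat) : Int) := by push_cast; ring
    have h1 : (1 : Int) = ((1 : Nat) : Int) := rfl
    rw [hb, h1, PySem.List.slice, hlen]
    rw [PySem.List.clampIdx_natCast, PySem.List.clampIdx_natCast]
    have ha : min 1 (m + 1) = 1 := by omega
    have hbb : min m (m + 1) = m := by omega
    rw [ha, hbb]
    rw [List.range_eq_range', List.range'_succ]
    simp only [List.map_cons, List.drop_succ_cons, List.drop_zero]
    rw [← List.map_take, take_range']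
    congr 2
    omega

theorem map_range'_rev (h : Nat → Int) (k : Nat) :
    (List.range' 1 k).map (fun m => h (k + 1 - m)) = ((List.range' 1 k).map h).reverse := by
  apply List.ext_getElem
  · simp
  · intro i h1 h2
    simp only [List.getElem_map, List.getElem_reverse, List.length_map, List.length_range',
      List.getElem_range']
    congr 1
    simp only [List.length_map, List.length_range'] at h1
    omega

-- ===== main assembly =====
theorem func_spec : Claim_equal_func := by
  intro arr _
  show func arr = func_alt arr
  obtain ⟨stkL, hLfold, _⟩ := stepsL arr arr.length
  have hRfold := stepsR arr arr.length arr.length le_rfl [] []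
    (by simp) ⟨List.Pairwise.nil, by simp, by intro m h1 h2 _; omega⟩
  have hleft : (List.range' 2 (arr.length - 2)).foldl (stepA arr) [0, 1]
      = (0 : Int) :: 1 :: (List.range' 1 (arr.length - 2)).map (fun i => (Lv arr i : Int)) := by
    have := leftA_loop arr (arr.length - 2) 0
    simpa using this
  have hright : rightLoopA arr arr.length [0, 1] (arr.length - 2)
      = (0 : Int) :: 1 :: ((List.range' 1 (arr.length - 2)).map
          (fun i => (Rv arr arr.length i : Int))).reverse := by
    have := rightA_loop arr arr.length (arr.length - 2) le_rfl
    have hemp : arr.length - 2 - (arr.length - 2) = 0 := by omega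
    rw [hemp] at this
    simpa using this
  have hrev : (List.range' 1 (arr.length - 2)).map
        (fun m => (Rv arr arr.length (arr.length - 1 - m) : Int))
      = ((List.range' 1 (arr.length - 2)).map (fun i => (Rv arr arr.length i : Int))).reverse := by
    rw [← map_range'_rev]
    apply List.map_congr_left
    intro m hm
    rw [List.mem_range'_1] at hm
    have harg : arr.length - 1 - m = arr.length - 2 + 1 - m := by omega
    rw [harg]
  simp only [func, func_alt]
  rw [hLfold, hRfold, hleft, hright]
  simp only []
  rw [slice_map_range, slice_map_range, hrev]
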